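-- pv_equiv track=rewrite | github.com/aiForensicsBook/llmInvestigation | forensic/testing/log_analyzer.py | _assess_decision_severity
-- ===== SOURCE A (Python) =====
-- from typing import Dict, List, Any, Optional, Tuple, Set
--
-- def _assess_decision_severity(bias_signals: List[str]) -> str:
--     """Assess severity of decision bias."""
--     critical_signals = ['score_decision_inconsistency', 'keyword_race_ethnicity']
--     high_signals = ['gender_name_bias', 'keyword_gender']
--
--     if any(signal in critical_signals for signal in bias_signals):
--         return 'critical'
--     elif any(signal in high_signals for signal in bias_signals):
--         return 'high'
--     elif len(bias_signals) > 2: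
--         return 'medium'
--     else:
--         return 'low'
-- ===== SOURCE B (Python) =====
-- def _assess_decision_severity(bias_signals):
--     """Assess severity of decision bias (table-driven single pass)."""
--     rank = {
--         'score_decision_inconsistency': 3,
--         'keyword_race_ethnicity': 3,
--         'gender_name_bias': 2,
--         'keyword_gender': 2,
--     }
--     m = 0
--     for sig in bias_signals:
--         m = max(m, rank.get(sig, 0))
--     if m == 3:
--         return 'critical'
--     elif m == 2:
--         return 'high'
--     elif len(bias_signals) > 2:
--         return 'medium'
--     else:
--         return 'low'
-- ===== Notes on version B (the rewrite author's own statement) =====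
-- stated objective: alternative
-- what changed: Replaces the two sequential any()-membership scans over constant lists with a single table-driven pass that tracks the maximum severity rank seen, then maps the max rank to the label.
import Mathlib
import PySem

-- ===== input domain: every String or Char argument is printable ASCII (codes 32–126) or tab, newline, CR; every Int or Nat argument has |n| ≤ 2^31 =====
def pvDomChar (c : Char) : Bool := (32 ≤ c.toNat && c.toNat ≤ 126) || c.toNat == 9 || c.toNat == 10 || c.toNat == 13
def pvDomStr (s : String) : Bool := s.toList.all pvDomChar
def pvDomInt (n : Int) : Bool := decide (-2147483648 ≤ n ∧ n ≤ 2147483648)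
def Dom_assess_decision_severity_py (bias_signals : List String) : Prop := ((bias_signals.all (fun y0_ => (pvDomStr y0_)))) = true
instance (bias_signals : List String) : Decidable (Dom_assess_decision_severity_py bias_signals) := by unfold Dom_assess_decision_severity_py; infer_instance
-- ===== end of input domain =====

-- B replaces A's two sequential any()-membership scans with one table-driven pass tracking the max severity rank (objective: alternative decomposition, same cost).

-- ===== PORT A =====
def assess_decision_severity_py (bias_signals : List String) : String :=
  let critical_signals : List String := ["score_decision_inconsistency", "keyword_race_ethnicity"]
  let high_signals : List String := ["gender_name_bias", "keyword_gender"]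
  if bias_signals.any (fun signal => critical_signals.contains signal) then "critical"
  else if bias_signals.any (fun signal => high_signals.contains signal) then "high"
  else if bias_signals.length > 2 then "medium"
  else "low"

-- ===== PORT B =====
def pvRankTable : PySem.Dict String Int :=
  PySem.Dict.ofList [("score_decision_inconsistency", 3), ("keyword_race_ethnicity", 3),
                     ("gender_name_bias", 2), ("keyword_gender", 2)]

def assess_decision_severity_py_alt (bias_signals : List String) : String :=
  let m : Int := bias_signals.foldl (fun m signal => max m (pvRankTable.getD signal 0)) 0
  if m = 3 then "critical"
  else if m = 2 then "high"
  else if bias_signals.length > 2 then "medium"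
  else "low"

-- ===== PRECONDITION & SPEC =====
def Spec_assess_decision_severity_py (bias_signals : List String) (out : String) : Prop := out = assess_decision_severity_py_alt bias_signals
instance (bias_signals : List String) (out : String) : Decidable (Spec_assess_decision_severity_py bias_signals out) := by unfold Spec_assess_decision_severity_py; infer_instance

-- ===== CLAIM (what is proved, stated in full; the proofs are below) =====
def Claim_equal_assess_decision_severity_py : Prop := ∀ (bias_signals : List String), Dom_assess_decision_severity_py bias_signals → Spec_assess_decision_severity_py bias_signals (assess_decision_severity_py bias_signals)

-- ===== LEMMAS AND PROOFS =====

theorem pvRank_eq (s : String) :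
    pvRankTable.getD s 0 =
      if s = "score_decision_inconsistency" ∨ s = "keyword_race_ethnicity" then (3 : Int)
      else if s = "gender_name_bias" ∨ s = "keyword_gender" then 2 else 0 := by
  by_cases h1 : s = "score_decision_inconsistency" <;>
    by_cases h2 : s = "keyword_race_ethnicity" <;>
    by_cases h3 : s = "gender_name_bias" <;>
    by_cases h4 : s = "keyword_gender" <;>
    simp [pvRankTable, PySem.Dict.ofList, PySem.Dict.update, PySem.Dict.getD_insert,
      h1, h2, h3, h4]

theorem pvFold_char (bs : List String) (a : Int) (ha : 0 ≤ a) :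
    bs.foldl (fun m signal => max m (pvRankTable.getD signal 0)) a =
      max a (if bs.any (fun s => decide (s = "score_decision_inconsistency" ∨ s = "keyword_race_ethnicity")) then 3
             else if bs.any (fun s => decide (s = "gender_name_bias" ∨ s = "keyword_gender")) then 2 else 0) := by
  induction bs generalizing a with
  | nil => simp; omega
  | cons s rest ih =>
    have hr := pvRank_eq s
    have ha' : (0 : Int) ≤ max a (pvRankTable.getD s 0) := le_trans ha (le_max_left _ _)
    rw [List.foldl_cons, ih _ ha', hr]
    simp only [List.any_cons, Bool.or_eq_true, decide_eq_true_eq]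
    by_cases h1 : s = "score_decision_inconsistency" ∨ s = "keyword_race_ethnicity" <;>
      by_cases h2 : s = "gender_name_bias" ∨ s = "keyword_gender" <;>
      simp [h1, h2] <;> split_ifs <;> omega

theorem pv_contains_crit (s : String) :
    (["score_decision_inconsistency", "keyword_race_ethnicity"] : List String).contains s =
      decide (s = "score_decision_inconsistency" ∨ s = "keyword_race_ethnicity") := by
  simp

theorem pv_contains_high (s : String) :
    (["gender_name_bias", "keyword_gender"] : List String).contains s =
      decide (s = "gender_name_bias" ∨ s = "keyword_gender") := by
  simp

-- ===== VERDICT (by name: the statement is the Claim_ definition above) =====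
theorem assess_decision_severity_py_spec : Claim_equal_assess_decision_severity_py := by
  intro bs _
  unfold Spec_assess_decision_severity_py assess_decision_severity_py assess_decision_severity_py_alt
  simp only [pvFold_char bs 0 le_rfl, pv_contains_crit, pv_contains_high,
    List.any_eq_true, decide_eq_true_eq]
  split_ifs <;> first | rfl | omega
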